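-- pv_equiv track=rewrite | github.com/rianePL/Python-2018-06-05 | funkcje 3 - argumenty domyślne.py | policz_znaki
-- ===== SOURCE A (Python) =====
-- def policz_znaki(napis, naw_otw='<', naw_zam='>'):
--     licznik = 0
--     poziom = 0
--
--     for a in napis:
--         if a == naw_otw:
--             poziom += 1
--         elif a == naw_zam:
--             poziom -= 1
--         else:
--             licznik += poziom
--
--     return licznik
-- ===== SOURCE B (Python) =====
-- def policz_znaki(napis, naw_otw='<', naw_zam='>'):
--     # Two-stage reformulation: suff[i] = number of plain (non-bracket)
--     # characters in napis[i:]; each opening bracket contributes +suff[i+1]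
--     # (plain chars after it) and each closing bracket -suff[i+1].
--     n = len(napis)
--     suff = [0] * (n + 1)
--     for i in range(n - 1, -1, -1):
--         c = napis[i]
--         suff[i] = suff[i + 1] + (1 if c != naw_otw and c != naw_zam else 0)
--     return sum(s if c == naw_otw else -s if c == naw_zam else 0
--                for c, s in zip(napis, suff[1:]))
-- ===== Notes on version B (the rewrite author's own statement) =====
-- stated objective: alternative
-- what changed: Replaces the single running-depth accumulation with two stages: precompute a suffix array of plain-character counts, then sum each bracket weighted by the plain characters after it.
import Mathlib
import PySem

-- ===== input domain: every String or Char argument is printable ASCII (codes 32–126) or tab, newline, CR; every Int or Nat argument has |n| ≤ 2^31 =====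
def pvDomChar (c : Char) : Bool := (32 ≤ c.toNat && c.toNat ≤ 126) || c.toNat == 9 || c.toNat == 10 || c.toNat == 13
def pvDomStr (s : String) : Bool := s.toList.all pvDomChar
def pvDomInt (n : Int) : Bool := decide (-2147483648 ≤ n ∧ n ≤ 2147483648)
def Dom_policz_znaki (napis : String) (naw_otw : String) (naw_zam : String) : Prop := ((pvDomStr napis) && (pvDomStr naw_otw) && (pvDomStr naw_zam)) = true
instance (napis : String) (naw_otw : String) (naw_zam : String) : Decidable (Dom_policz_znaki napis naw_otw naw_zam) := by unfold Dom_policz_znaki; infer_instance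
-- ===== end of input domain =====

-- B replaces the single running-depth loop by two stages: a suffix array of
-- plain-char counts, then each bracket weighted by the plain chars after it
-- (objective: alternative).
-- ===== PORT A =====
def policz_znaki (napis : String) (naw_otw : String) (naw_zam : String) : Int :=
  (napis.toList.foldl (fun (st : Int × Int) a =>
      if String.ofList [a] == naw_otw then (st.1, st.2 + 1)
      else if String.ofList [a] == naw_zam then (st.1, st.2 - 1)
      else (st.1 + st.2, st.2)) (0, 0)).1

-- ===== PORT B =====
-- pzInc: the per-character increment of Source B's stage-1 loop (1 for a plain char).
def pzInc (op cl : Char → Bool) (a : Char) : Int :=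
  if !(op a) && !(cl a) then 1 else 0

-- pzSuff: Source B's suffix array `suff` (suff[i] = plain chars in napis[i:]);
-- the Python loop fills it back-to-front, this recursion builds the same list.
def pzSuff (op cl : Char → Bool) : List Char → List Int
  | [] => [0]
  | a :: cs =>
    let s := pzSuff op cl cs
    (s.headI + pzInc op cl a) :: s

def policz_znaki_alt (napis : String) (naw_otw : String) (naw_zam : String) : Int :=
  (List.zip napis.toList
      ((pzSuff (fun a => String.ofList [a] == naw_otw)
               (fun a => String.ofList [a] == naw_zam) napis.toList).tail)).foldl
    (fun w p =>
      if String.ofList [p.1] == naw_otw then w + p.2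
      else if String.ofList [p.1] == naw_zam then w - p.2
      else w) 0

-- ===== PRECONDITION & SPEC =====
def Spec_policz_znaki (napis : String) (naw_otw : String) (naw_zam : String) (out : Int) : Prop := out = policz_znaki_alt napis naw_otw naw_zam
instance (napis : String) (naw_otw : String) (naw_zam : String) (out : Int) : Decidable (Spec_policz_znaki napis naw_otw naw_zam out) := by unfold Spec_policz_znaki; infer_instance

-- ===== CLAIM (what is proved, stated in full; the proofs are below) =====
def Claim_equal_policz_znaki : Prop := ∀ (napis : String) (naw_otw : String) (naw_zam : String), Dom_policz_znaki napis naw_otw naw_zam → Spec_policz_znaki napis naw_otw naw_zam (policz_znaki napis naw_otw naw_zam)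

-- ===== LEMMAS AND PROOFS =====

-- the bracket-weighted sum, written as a structural recursion (proof vehicle)
def pzBsum (op cl : Char → Bool) : List Char → Int
  | [] => 0
  | a :: cs =>
    (if op a then (pzSuff op cl cs).headI
     else if cl a then -(pzSuff op cl cs).headI
     else 0) + pzBsum op cl cs

theorem pzSuff_shape (op cl : Char → Bool) (cs : List Char) :
    pzSuff op cl cs = (pzSuff op cl cs).headI :: (pzSuff op cl cs).tail := by
  cases cs <;> rfl

-- A's fold from state (l, p) equals l + p·(plain count) + the bracket-weighted sum
theorem pz_main (op cl : Char → Bool) (cs : List Char) : ∀ l p : Int,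
    (cs.foldl (fun (st : Int × Int) a =>
        if op a then (st.1, st.2 + 1)
        else if cl a then (st.1, st.2 - 1)
        else (st.1 + st.2, st.2)) (l, p)).1
      = l + p * (pzSuff op cl cs).headI + pzBsum op cl cs := by
  induction cs with
  | nil => intro l p; simp [pzSuff, pzBsum]
  | cons a cs ih =>
    intro l p
    simp only [List.foldl]
    by_cases h1 : op a
    · rw [if_pos h1, ih, pzBsum, pzSuff]; simp [h1, pzInc]; ring
    · by_cases h2 : cl a
      · rw [if_neg h1, if_pos h2, ih, pzBsum, pzSuff]; simp [h1, h2, pzInc]; ring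
      · rw [if_neg h1, if_neg h2, ih, pzBsum, pzSuff]; simp [h1, h2, pzInc]; ring

-- B's fold over the zipped suffix array equals the recursive bracket-weighted sum
theorem pz_zipsum (op cl : Char → Bool) (cs : List Char) : ∀ w : Int,
    ((List.zip cs (pzSuff op cl cs).tail).foldl
      (fun w p => if op p.1 then w + p.2 else if cl p.1 then w - p.2 else w) w)
      = w + pzBsum op cl cs := by
  induction cs with
  | nil => intro w; simp [pzSuff, pzBsum]
  | cons a cs ih =>
    intro w
    have htail : (pzSuff op cl (a :: cs)).tail = pzSuff op cl cs := rfl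
    rw [htail, pzSuff_shape op cl cs]
    simp only [List.zip_cons_cons, List.foldl, pzBsum]
    rw [ih]
    split_ifs <;> ring

-- ===== VERDICT (by name: the statement is the Claim_ definition above) =====
theorem policz_znaki_spec : Claim_equal_policz_znaki := by
  intro napis naw_otw naw_zam _
  unfold Spec_policz_znaki policz_znaki policz_znaki_alt
  rw [pz_main (fun a => String.ofList [a] == naw_otw)
      (fun a => String.ofList [a] == naw_zam) napis.toList 0 0,
    pz_zipsum (fun a => String.ofList [a] == naw_otw)
      (fun a => String.ofList [a] == naw_zam) napis.toList 0]
  ring
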